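-- pv_equiv track=rewrite | github.com/younseochoi/coding-study | seunghee/stack&queue/기능개발.py | solution
-- ===== SOURCE A (Python) =====
-- import math
-- from collections import Counter
--
-- def solution(progresses, speeds):
--     release = []
--     for p,s in zip(progresses, speeds):
--         release.append(math.ceil((100-p)/s))
--
--     for i in range (1, len(release)):
--         if release[i] <= release[i-1]:
--             release[i] = release[i-1]
--
--     return list(Counter(release).values())
-- ===== SOURCE B (Python) =====
-- import math
--
-- def solution(progresses, speeds):
--     # Right-to-left monotonic stack of (leader_day, count) groups of the suffix.
--     stack = []  # top of stack = leftmost group of the suffix processed so far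
--     for p, s in reversed(list(zip(progresses, speeds))):
--         d = math.ceil((100 - p) / s)
--         count = 1
--         while stack and stack[-1][0] <= d:
--             count += stack.pop()[1]
--         stack.append((d, count))
--     return [count for _, count in reversed(stack)]
-- ===== Notes on version B (the rewrite author's own statement) =====
-- stated objective: alternative
-- what changed: Replaces A's left-to-right running-max propagation into the array plus a Counter by a right-to-left monotonic stack of (leader, count) groups: each new day absorbs all stacked groups whose leader is <= it, so no mutated release array and no Counter.
import Mathlib
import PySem

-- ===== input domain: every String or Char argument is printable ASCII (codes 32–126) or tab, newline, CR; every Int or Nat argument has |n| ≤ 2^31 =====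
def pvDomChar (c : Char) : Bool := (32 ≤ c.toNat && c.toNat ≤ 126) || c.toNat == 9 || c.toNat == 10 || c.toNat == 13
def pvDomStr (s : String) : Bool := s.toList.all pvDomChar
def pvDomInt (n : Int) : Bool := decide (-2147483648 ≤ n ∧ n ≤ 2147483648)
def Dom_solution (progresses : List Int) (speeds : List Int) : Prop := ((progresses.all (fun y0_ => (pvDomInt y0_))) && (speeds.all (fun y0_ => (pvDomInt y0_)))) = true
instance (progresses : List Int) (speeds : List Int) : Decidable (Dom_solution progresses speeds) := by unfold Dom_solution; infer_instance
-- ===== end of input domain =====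

-- B replaces A's running-max propagation pass + Counter by a right-to-left monotonic
-- stack of (leader, count) groups; same cost, a genuinely different traversal.

-- ===== PORT A =====
-- math.ceil((100-p)/s) : on Dom (|100-p| ≤ 2^31+100 < 2^53, |s| ≤ 2^31) Python's float
-- division is exact enough that ceil of the float equals the exact integer ceiling -(-(100-p)//s).
def pvCeil (p : Int) (s : Int) : Int := -(PySem.Int.floordiv (-(100 - p)) s)

def solution (progresses : List Int) (speeds : List Int) : List Int :=
  -- release.append(math.ceil((100-p)/s)) for p,s in zip(progresses, speeds)
  let release := (progresses.zip speeds).foldl (fun acc ps => acc ++ [pvCeil ps.1 ps.2]) []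
  -- for i in range(1, len(release)): if release[i] <= release[i-1]: release[i] = release[i-1]
  -- (indices produced by range(1, len) are always in bounds, so pyGetD's default 0 is never used)
  let release2 := (PySem.List.pyRange 1 (release.length : Int) 1).foldl
    (fun rel i =>
      if PySem.List.pyGetD rel i 0 ≤ PySem.List.pyGetD rel (i - 1) 0 then
        rel.set i.toNat (PySem.List.pyGetD rel (i - 1) 0)
      else rel) release
  -- list(Counter(release).values())
  (PySem.Dict.counter release2).values

-- ===== PORT B =====
-- the inner while loop + append: pop stacked groups whose leader ≤ d, summing their
-- counts into c, then push (d, c).  The Lean list's HEAD is the Python stack's TOP (its end).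
def pushGroup (d : Int) (c : Int) : List (Int × Int) → List (Int × Int)
  | [] => [(d, c)]
  | (l, k) :: st => if l ≤ d then pushGroup d (c + k) st else (d, c) :: (l, k) :: st

def solution_alt (progresses : List Int) (speeds : List Int) : List Int :=
  -- for p, s in reversed(list(zip(progresses, speeds))): d = ceil((100-p)/s); while … ; append
  let st := ((progresses.zip speeds).reverse).foldl
    (fun st ps => pushGroup (pvCeil ps.1 ps.2) 1 st) []
  -- [count for _, count in reversed(stack)]  (reversing the Python stack = reading the Lean list head-first)
  st.map Prod.snd

-- ===== PRECONDITION & SPEC =====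
-- Pre_ excludes exactly the inputs where Python A raises ZeroDivisionError: a speed 0 paired by zip.
def Pre_solution (progresses : List Int) (speeds : List Int) : Prop :=
  ∀ ps ∈ progresses.zip speeds, ps.2 ≠ 0
instance (progresses : List Int) (speeds : List Int) : Decidable (Pre_solution progresses speeds) := by unfold Pre_solution; infer_instance
def pvWitness_solution : List Int × List Int := ([93, 30, 55], [1, 30, 5])

def Spec_solution (progresses : List Int) (speeds : List Int) (out : List Int) : Prop := out = solution_alt progresses speeds
instance (progresses : List Int) (speeds : List Int) (out : List Int) : Decidable (Spec_solution progresses speeds out) := by unfold Spec_solution; infer_instance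

-- ===== CLAIM (what is proved, stated in full; the proofs are below) =====
def Claim_equal_solution : Prop := ∀ (progresses : List Int) (speeds : List Int), Dom_solution progresses speeds → Pre_solution progresses speeds → Spec_solution progresses speeds (solution progresses speeds)

-- ===== LEMMAS AND PROOFS =====

-- the left-to-right grouping scan both sides are reduced to:
-- count += 1 while day ≤ front, else flush count and restart at day
def altGo (front : Int) (count : Int) (answer : List Int) : List Int → List Int
  | [] => answer ++ [count]
  | day :: rest =>
    if day ≤ front then altGo front (count + 1) answer rest
    else altGo day 1 (answer ++ [count]) rest

-- the running-max scan that A's in-place index loop computes on the tail of release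
def smax (f : Int) : List Int → List Int
  | [] => []
  | d :: ds => max f d :: smax (max f d) ds

-- reading the element just appended
theorem getD_append_cons (q : List Int) (d : Int) (l : List Int) :
    (q ++ d :: l).getD q.length 0 = d := by
  induction q with
  | nil => rfl
  | cons a q ih => simpa using ih

-- reading the last element of the processed prefix
theorem getD_append_pred (q : List Int) (f : Int) (l : List Int) (h : q.getLast? = some f) :
    (q ++ l).getD (q.length - 1) 0 = f := by
  have hne : q ≠ [] := by rintro rfl; simp at h
  have hlt : q.length - 1 < q.length := by
    have := List.length_pos_of_ne_nil hne; omega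
  rw [List.getLast?_eq_getElem?] at h
  simp [List.getD, List.getElem?_append_left hlt, h]

-- writing at the position just after the prefix
theorem set_append_cons (q : List Int) (d v : Int) (l : List Int) :
    (q ++ d :: l).set q.length v = q ++ v :: l := by
  induction q with
  | nil => rfl
  | cons a q ih => simpa using ih

-- A's index loop, started after a processed prefix q ending in f, turns the
-- unprocessed suffix ds into the running-max scan smax f ds
theorem propagate_eq_smax (ds : List Int) :
    ∀ (q : List Int) (f : Int), q.getLast? = some f →
    (PySem.List.pyRange (q.length : Int) (((q.length + ds.length : Nat)) : Int) 1).foldl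
      (fun rel i =>
        if PySem.List.pyGetD rel i 0 ≤ PySem.List.pyGetD rel (i - 1) 0 then
          rel.set i.toNat (PySem.List.pyGetD rel (i - 1) 0)
        else rel) (q ++ ds) = q ++ smax f ds := by
  induction ds with
  | nil =>
    intro q f _
    simp [PySem.List.pyRange, smax]
  | cons d ds ih =>
    intro q f hlast
    have hne : q ≠ [] := by rintro rfl; simp at hlast
    have hq1 : 1 ≤ q.length := List.length_pos_of_ne_nil hne
    have hlt : (q.length : Int) < ((q.length + (d :: ds).length : Nat) : Int) := by
      simp
    rw [PySem.List.pyRange_one_cons hlt, List.foldl_cons]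
    have hget1 : PySem.List.pyGetD (q ++ d :: ds) (q.length : Int) 0 = d := by
      rw [PySem.List.pyGetD_natCast]; exact getD_append_cons q d ds
    have hcast : ((q.length : Int) - 1) = ((q.length - 1 : Nat) : Int) := by push_cast [hq1]; ring
    have hget0 : PySem.List.pyGetD (q ++ d :: ds) ((q.length : Int) - 1) 0 = f := by
      rw [hcast, PySem.List.pyGetD_natCast]
      exact getD_append_pred q f (d :: ds) hlast
    have hstop : (q.length + (d :: ds).length) = (q.length + 1 + ds.length) := by
      simp only [List.length_cons]; omega
    have harg : ((q.length : Int) + 1) = ((q.length + 1 : Nat) : Int) := by push_cast; ring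
    simp only [hget1, hget0, Int.toNat_natCast]
    rw [hstop, harg]
    by_cases hdf : d ≤ f
    · rw [if_pos hdf, set_append_cons]
      have hthis := ih (q ++ [f]) f (by simp)
      simp only [List.length_append, List.length_cons, List.length_nil, Nat.zero_add] at hthis
      simp only [List.append_assoc, List.singleton_append] at hthis
      simp only [smax, max_eq_left hdf]
      exact hthis
    · rw [if_neg hdf]
      have hthis := ih (q ++ [d]) d (by simp)
      simp only [List.length_append, List.length_cons, List.length_nil, Nat.zero_add] at hthis
      simp only [List.append_assoc, List.singleton_append] at hthis
      simp only [smax, max_eq_right (le_of_not_ge hdf)]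
      exact hthis

-- Counter's step on a dict whose last (and largest) key is f, counting f again
theorem modify_hit (E : List (Int × Int)) (f c : Int) (h : ∀ p ∈ E, p.1 < f) :
    (PySem.Dict.mk (E ++ [(f, c)])).modify f 0 (· + 1) = PySem.Dict.mk (E ++ [(f, c + 1)]) := by
  have hfind : List.find? (fun p => p.1 == f) E = none := by
    apply List.find?_eq_none.mpr
    intro p hp
    simpa using ne_of_lt (h p hp)
  have hc : (PySem.Dict.mk (E ++ [(f, c)])).contains f = true := by
    simp [PySem.Dict.contains]
  have hg : (PySem.Dict.mk (E ++ [(f, c)])).getD f 0 = c := by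
    simp [PySem.Dict.getD, PySem.Dict.get?, List.find?_append, hfind]
  simp only [PySem.Dict.modify, PySem.Dict.insert, hg, hc, if_true]
  congr 1
  rw [List.map_append,
    List.map_congr_left (g := id) (fun p hp => by simp [ne_of_lt (h p hp)]), List.map_id]
  simp

-- Counter's step on a new key x larger than every key present: appended at the end
theorem modify_miss (E : List (Int × Int)) (x : Int) (h : ∀ p ∈ E, p.1 < x) :
    (PySem.Dict.mk E).modify x 0 (· + 1) = PySem.Dict.mk (E ++ [(x, 1)]) := by
  have hc : (PySem.Dict.mk E).contains x = false := by
    simp only [PySem.Dict.contains, List.any_eq_false]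
    intro p hp
    simpa using ne_of_lt (h p hp)
  have hg : (PySem.Dict.mk E).getD x 0 = 0 := PySem.Dict.getD_of_not_contains _ _ hc
  simp only [PySem.Dict.modify, PySem.Dict.insert, hg, hc]
  norm_num

-- Counter, folded over the running-max scan from a dict ending in (f, c) whose keys are < f,
-- yields exactly the grouping loop over the raw days
theorem counter_smax_eq_altGo (ds : List Int) :
    ∀ (E : List (Int × Int)) (f c : Int), (∀ p ∈ E, p.1 < f) →
    PySem.Dict.values ((smax f ds).foldl (fun d x => d.modify x 0 (· + 1))
        (PySem.Dict.mk (E ++ [(f, c)]))) = altGo f c (E.map Prod.snd) ds := by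
  induction ds with
  | nil =>
    intro E f c _
    simp [smax, altGo, PySem.Dict.values]
  | cons d ds ih =>
    intro E f c h
    by_cases hdf : d ≤ f
    · have hm : max f d = f := max_eq_left hdf
      simp only [smax, hm, List.foldl_cons, modify_hit E f c h]
      rw [ih E f (c + 1) h]
      simp [altGo, hdf]
    · have hfd : f < d := lt_of_not_ge hdf
      have hm : max f d = d := max_eq_right (le_of_lt hfd)
      have h' : ∀ p ∈ E ++ [(f, c)], p.1 < d := by
        intro p hp
        rcases List.mem_append.mp hp with hp | hp
        · exact lt_trans (h p hp) hfd
        · simp at hp; simp [hp, hfd]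
      have hmiss := modify_miss (E ++ [(f, c)]) d h'
      simp only [smax, hm, List.foldl_cons, hmiss]
      rw [List.append_assoc] at *
      have hthis := ih (E ++ [(f, c)]) d 1 h'
      rw [List.append_assoc] at hthis
      rw [hthis]
      simp [altGo, hdf]

-- ===== B-side lemmas: the stack fold computes the same grouping =====

-- the right-to-left recursion B's fold over the reversed list performs
def groupsOf : List Int → List (Int × Int)
  | [] => []
  | d :: ds => pushGroup d 1 (groupsOf ds)

-- B's foldl over the reversed day list is groupsOf
theorem foldl_reverse_eq_groupsOf (ds : List Int) :
    ds.reverse.foldl (fun st d => pushGroup d 1 st) [] = groupsOf ds := by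
  induction ds with
  | nil => rfl
  | cons d ds ih => simp [List.foldl_append, groupsOf, ih]

-- absorbing twice in a row collapses (x ≤ d): the outer push swallows the inner group whole
theorem pushGroup_pushGroup (d c x k : Int) (hxd : x ≤ d) :
    ∀ g : List (Int × Int), pushGroup d c (pushGroup x k g) = pushGroup d (c + k) g := by
  intro g
  induction g generalizing k with
  | nil => simp [pushGroup, hxd]
  | cons p g ih =>
    obtain ⟨l, j⟩ := p
    by_cases hlx : l ≤ x
    · simp only [pushGroup, if_pos hlx, if_pos (le_trans hlx hxd), ih]
      ring_nf
    · simp [pushGroup, hlx, hxd]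

-- pushGroup always leaves (x, _) on top
theorem pushGroup_head (x k : Int) :
    ∀ g : List (Int × Int), ∃ c' g', pushGroup x k g = (x, c') :: g' := by
  intro g
  induction g generalizing k with
  | nil => exact ⟨k, [], rfl⟩
  | cons p g ih =>
    obtain ⟨l, j⟩ := p
    by_cases hlx : l ≤ x
    · simpa [pushGroup, hlx] using ih (k + j)
    · exact ⟨k, (l, j) :: g, by simp [pushGroup, hlx]⟩

-- the accumulator of altGo is a plain prefix
theorem altGo_append (ds : List Int) :
    ∀ (f c : Int) (ans : List Int), altGo f c ans ds = ans ++ altGo f c [] ds := by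
  induction ds with
  | nil => intro f c ans; simp [altGo]
  | cons d ds ih =>
    intro f c ans
    by_cases hdf : d ≤ f
    · simp only [altGo, if_pos hdf]; exact ih f (c + 1) ans
    · simp only [altGo, if_neg hdf, List.nil_append]
      rw [ih d 1 (ans ++ [c]), ih d 1 [c], List.append_assoc]

-- counts of the stacked groups, read top-first, are the left-to-right grouping scan
theorem map_snd_pushGroup (ds : List Int) :
    ∀ (d c : Int), (pushGroup d c (groupsOf ds)).map Prod.snd = altGo d c [] ds := by
  induction ds with
  | nil => intro d c; simp [groupsOf, pushGroup, altGo]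
  | cons x rest ih =>
    intro d c
    by_cases hxd : x ≤ d
    · rw [groupsOf, pushGroup_pushGroup d c x 1 hxd (groupsOf rest)]
      simp only [altGo, if_pos hxd]
      exact ih d (c + 1)
    · obtain ⟨c', g', hg⟩ := pushGroup_head x 1 (groupsOf rest)
      simp only [groupsOf, hg, pushGroup, if_neg hxd, List.map_cons]
      simp only [altGo, if_neg hxd, List.nil_append]
      rw [altGo_append rest x 1 [c], ← ih x 1, hg]
      simp

-- ===== VERDICT (by name: the statement is the Claim_ definition above) =====
theorem solution_spec : Claim_equal_solution := by
  intro progresses speeds _ _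
  unfold Spec_solution solution solution_alt
  rw [PySem.List.foldl_append_singleton_eq_map]
  simp only [List.nil_append]
  have hmap : (progresses.zip speeds).reverse.foldl
      (fun st ps => pushGroup (pvCeil ps.1 ps.2) 1 st) []
      = ((progresses.zip speeds).map (fun ps => pvCeil ps.1 ps.2)).reverse.foldl
          (fun st d => pushGroup d 1 st) [] := by
    rw [← List.map_reverse, List.foldl_map]
  rw [hmap, foldl_reverse_eq_groupsOf]
  cases hrel : (progresses.zip speeds).map (fun ps => pvCeil ps.1 ps.2) with
  | nil => simp [PySem.List.pyRange, PySem.Dict.counter, PySem.Dict.values, PySem.Dict.empty, groupsOf]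
  | cons d ds =>
    have hprop := propagate_eq_smax ds [d] d rfl
    simp only [List.length_cons, List.length_nil, Nat.zero_add, Nat.cast_one,
      List.singleton_append] at hprop
    have hlen : ((d :: ds).length : Int) = ((1 + ds.length : Nat) : Int) := by
      simp; omega
    rw [hlen, hprop]
    have hstep : PySem.Dict.counter (d :: smax d ds)
        = (smax d ds).foldl (fun dd x => dd.modify x 0 (· + 1)) (PySem.Dict.mk [(d, 1)]) := rfl
    rw [hstep]
    have hfin := counter_smax_eq_altGo ds [] d 1 (by simp)
    simp only [List.nil_append, List.map_nil] at hfin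
    rw [hfin, groupsOf, map_snd_pushGroup]
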